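-- pv_equiv track=rewrite | github.com/PranavKangane/Leetcode-Python-Solutions | 4008-restore-finishing-order/restore-finishing-order.py | recoverOrder
-- ===== SOURCE A (Python) =====
-- from typing import List
--
-- def recoverOrder(order: List[int], friends: List[int]) -> List[int]:
--
--     hashmap = {person: i for i, person in enumerate(order)}
--
--
--     freq = []
--     for f in friends:
--         freq.append((hashmap[f], f))
--
--     freq.sort()
--     result = []
--     for rank,pair in freq:
--         result.append(pair)
--
--     return result
-- ===== SOURCE B (Python) =====
-- from typing import List
--
-- def recoverOrder(order: List[int], friends: List[int]) -> List[int]: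
--     # Counting/bucket sort over ranks instead of a comparison sort of (rank, friend) pairs.
--     hashmap = {person: i for i, person in enumerate(order)}
--     counts = {}
--     for f in friends:
--         r = hashmap[f]
--         counts[r] = counts.get(r, 0) + 1
--     result = []
--     for rank in range(len(order)):
--         result += [order[rank]] * counts.get(rank, 0)
--     return result
-- ===== Notes on version B (the rewrite author's own statement) =====
-- stated objective: alternative
-- what changed: Replaces A's comparison sort of (rank, friend) pairs by a counting/bucket pass: tally occurrences per rank in a dict, then emit order[rank] repeated count times for rank = 0..n-1.
import Mathlib
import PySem

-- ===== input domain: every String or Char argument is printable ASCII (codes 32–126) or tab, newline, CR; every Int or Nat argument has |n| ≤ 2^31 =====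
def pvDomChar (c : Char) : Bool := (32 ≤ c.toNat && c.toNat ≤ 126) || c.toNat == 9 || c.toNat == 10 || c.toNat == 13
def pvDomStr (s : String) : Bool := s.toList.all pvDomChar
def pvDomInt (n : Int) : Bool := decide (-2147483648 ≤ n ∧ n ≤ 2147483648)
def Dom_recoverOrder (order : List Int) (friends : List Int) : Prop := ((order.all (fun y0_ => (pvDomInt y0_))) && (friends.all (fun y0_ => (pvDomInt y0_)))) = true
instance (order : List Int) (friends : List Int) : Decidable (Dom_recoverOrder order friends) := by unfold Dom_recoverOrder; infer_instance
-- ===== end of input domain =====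

-- B replaces A's comparison sort of (rank, friend) pairs by a counting (bucket) sort over the ranks.

-- ===== PORT A =====
def recoverOrder (order : List Int) (friends : List Int) : List Int :=
  let hashmap := (PySem.List.enumerate order 0).foldl (fun d p => d.insert p.2 p.1)
      (PySem.Dict.empty : PySem.Dict Int Int)
  let freq := friends.foldl (fun acc f => acc ++ [(((hashmap.get? f).getD 0 : Int), f)])
      ([] : List (Int × Int))
  -- freq.sort() sorts the (rank, friend) tuples lexicographically
  let freqS := PySem.List.sorted2 freq (fun p => p.1) (fun p => p.2)
  freqS.foldl (fun acc p => acc ++ [p.2]) []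

-- ===== PORT B =====
def recoverOrder_alt (order : List Int) (friends : List Int) : List Int :=
  let hashmap := (PySem.List.enumerate order 0).foldl (fun d p => d.insert p.2 p.1)
      (PySem.Dict.empty : PySem.Dict Int Int)
  let counts := friends.foldl (fun d f => d.modify ((hashmap.get? f).getD 0) 0 (· + 1))
      (PySem.Dict.empty : PySem.Dict Int Int)
  (PySem.List.pyRange 0 order.length 1).foldl
    (fun acc rank => acc ++ PySem.List.pyRepeat [PySem.List.pyGetD order rank 0] (counts.getD rank 0)) []

-- ===== PRECONDITION & SPEC =====
-- Pre_ excludes exactly the inputs where some friend is absent from order: there hashmap[f] raises KeyError in A (and in B).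
def Pre_recoverOrder (order : List Int) (friends : List Int) : Prop := ∀ f ∈ friends, f ∈ order
instance (order : List Int) (friends : List Int) : Decidable (Pre_recoverOrder order friends) := by unfold Pre_recoverOrder; infer_instance
def pvWitness_recoverOrder : List Int × List Int := ([3, 1, 2], [2, 3, 2])

def Spec_recoverOrder (order : List Int) (friends : List Int) (out : List Int) : Prop := out = recoverOrder_alt order friends
instance (order : List Int) (friends : List Int) (out : List Int) : Decidable (Spec_recoverOrder order friends out) := by unfold Spec_recoverOrder; infer_instance

-- ===== CLAIM (what is proved, stated in full; the proofs are below) =====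
def Claim_equal_recoverOrder : Prop := ∀ (order : List Int) (friends : List Int), Dom_recoverOrder order friends → Pre_recoverOrder order friends → Spec_recoverOrder order friends (recoverOrder order friends)

-- ===== LEMMAS AND PROOFS =====

-- The dict {person: i for i, person in enumerate(order)}: every stored value is a valid index of its key.
theorem pvBuild_get?_spec (order : List Int) : ∀ (s : Int) (d : PySem.Dict Int Int) (f r : Int),
    ((PySem.List.enumerate order s).foldl (fun d p => d.insert p.2 p.1) d).get? f = some r →
    d.get? f = some r ∨ ∃ k : Nat, k < order.length ∧ r = s + k ∧ order[k]? = some f := by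
  induction order with
  | nil => intro s d f r h; simp [PySem.List.enumerate] at h; exact Or.inl h
  | cons x xs ih =>
    intro s d f r h
    rw [PySem.List.enumerate_cons] at h
    simp only [List.foldl_cons] at h
    rcases ih (s + 1) (d.insert x s) f r h with h' | ⟨k, hk, hr, hget⟩
    · rw [PySem.Dict.get?_insert] at h'
      by_cases hfx : f = x
      · subst hfx; simp at h'
        refine Or.inr ⟨0, by simp, by omega, by simp⟩
      · simp [hfx] at h'; exact Or.inl h'
    · refine Or.inr ⟨k + 1, by simp only [List.length_cons]; omega, by push_cast; omega, by simpa using hget⟩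

theorem pvBuild_isSome_mono (order : List Int) : ∀ (s : Int) (d : PySem.Dict Int Int) (f : Int),
    (d.get? f).isSome →
    (((PySem.List.enumerate order s).foldl (fun d p => d.insert p.2 p.1) d).get? f).isSome := by
  induction order with
  | nil => intro s d f h; simpa [PySem.List.enumerate] using h
  | cons x xs ih =>
    intro s d f h
    rw [PySem.List.enumerate_cons]
    simp only [List.foldl_cons]
    apply ih
    rw [PySem.Dict.get?_insert]
    by_cases hfx : f = x <;> simp [hfx, h]

theorem pvBuild_isSome (order : List Int) : ∀ (s : Int) (d : PySem.Dict Int Int) (f : Int),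
    f ∈ order →
    (((PySem.List.enumerate order s).foldl (fun d p => d.insert p.2 p.1) d).get? f).isSome := by
  induction order with
  | nil => intro s d f h; simp at h
  | cons x xs ih =>
    intro s d f h
    rw [PySem.List.enumerate_cons]
    simp only [List.foldl_cons]
    rcases List.mem_cons.mp h with h | h
    · apply pvBuild_isSome_mono
      rw [PySem.Dict.get?_insert]; simp [h]
    · exact ih (s + 1) _ f h

-- Combined: for f ∈ order, the dict lookup (with default) is a valid index k with order[k] = f.
theorem pvHashmap_spec (order : List Int) (f : Int) (hf : f ∈ order) :
    ∃ k : Nat, k < order.length ∧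
      (((PySem.List.enumerate order 0).foldl (fun d p => d.insert p.2 p.1)
        (PySem.Dict.empty : PySem.Dict Int Int)).get? f).getD 0 = (k : Int) ∧
      order[k]? = some f := by
  have hs := pvBuild_isSome order 0 PySem.Dict.empty f hf
  rcases Option.isSome_iff_exists.mp hs with ⟨r, hr⟩
  rcases pvBuild_get?_spec order 0 PySem.Dict.empty f r hr with h' | ⟨k, hk, hrk, hget⟩
  · simp [PySem.Dict.get?_empty] at h'
  · exact ⟨k, hk, by rw [hr]; simp [hrk], hget⟩

theorem pvInsertBy_congr {α : Type} (b₁ b₂ : α → α → Bool) (x : α) :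
    ∀ (ys : List α), (∀ y ∈ ys, b₁ x y = b₂ x y) →
    PySem.List.insertBy b₁ x ys = PySem.List.insertBy b₂ x ys := by
  intro ys
  induction ys with
  | nil => intro _; rfl
  | cons y ys ih =>
    intro h
    have hy := h y (List.mem_cons_self)
    simp only [PySem.List.insertBy, hy]
    by_cases hb : b₂ x y = true
    · simp [hb]
    · simp only [hb]
      have := ih (fun z hz => h z (List.mem_cons_of_mem _ hz))
      rw [this]

theorem pvFoldl_insertBy_congr {α : Type} (b₁ b₂ : α → α → Bool) :
    ∀ (xs acc : List α),
    (∀ a b : α, (a ∈ acc ∨ a ∈ xs) → (b ∈ acc ∨ b ∈ xs) → b₁ a b = b₂ a b) →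
    xs.foldl (fun acc x => PySem.List.insertBy b₁ x acc) acc
      = xs.foldl (fun acc x => PySem.List.insertBy b₂ x acc) acc := by
  intro xs
  induction xs with
  | nil => intro acc _; rfl
  | cons x xs ih =>
    intro acc h
    simp only [List.foldl_cons]
    have hx : PySem.List.insertBy b₁ x acc = PySem.List.insertBy b₂ x acc :=
      pvInsertBy_congr b₁ b₂ x acc (fun y hy =>
        h x y (Or.inr List.mem_cons_self) (Or.inl hy))
    rw [hx]
    apply ih
    intro a b ha hb
    apply h a b
    · rcases ha with ha | ha
      · rcases (PySem.List.mem_insertBy b₂ x a acc).mp ha with h' | h'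
        · exact Or.inr (h' ▸ List.mem_cons_self)
        · exact Or.inl h'
      · exact Or.inr (List.mem_cons_of_mem _ ha)
    · rcases hb with hb | hb
      · rcases (PySem.List.mem_insertBy b₂ x b acc).mp hb with h' | h'
        · exact Or.inr (h' ▸ List.mem_cons_self)
        · exact Or.inl h'
      · exact Or.inr (List.mem_cons_of_mem _ hb)

-- On a pair list whose second component is a function of the first, the lexicographic tuple sort
-- is the sort by first component alone.
theorem pvSorted2_eq_sorted_fst (freq : List (Int × Int)) (g : Int → Int)
    (hg : ∀ p ∈ freq, p.2 = g p.1) :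
    PySem.List.sorted2 freq (fun p => p.1) (fun p => p.2)
      = PySem.List.sorted freq (fun p => p.1) := by
  show freq.foldl (fun acc x => PySem.List.insertBy _ x acc) []
      = freq.foldl (fun acc x => PySem.List.insertBy _ x acc) []
  apply pvFoldl_insertBy_congr
  intro a b ha hb
  have ha' : a ∈ freq := by simpa using ha
  have hb' : b ∈ freq := by simpa using hb
  by_cases h1 : a.1 < b.1
  · simp [h1]
  · by_cases h2 : b.1 < a.1
    · simp [h1, h2]
    · have heq : a.1 = b.1 := le_antisymm (not_lt.mp h2) (not_lt.mp h1)
      have : a.2 = b.2 := by rw [hg a ha', hg b hb', heq]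
      simp [h1, h2, this]

theorem pvCount_flatMap_replicate (c : Int → Nat) (x : Int) :
    ∀ (is : List Int), is.Nodup →
    (is.flatMap (fun i => List.replicate (c i) i)).count x = if x ∈ is then c x else 0 := by
  intro is
  induction is with
  | nil => intro _; simp
  | cons i is ih =>
    intro hnd
    rcases List.nodup_cons.mp hnd with ⟨hni, hnd'⟩
    simp only [List.flatMap_cons, List.count_append, ih hnd', List.count_replicate]
    by_cases hx : x = i
    · subst hx; simp [hni]
    · simp [hx, Ne.symm hx, List.mem_cons]

theorem pvPairwise_flatMap_replicate (c : Int → Nat) :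
    ∀ (is : List Int), is.Pairwise (· < ·) →
    (is.flatMap (fun i => List.replicate (c i) i)).Pairwise (· ≤ ·) := by
  intro is
  induction is with
  | nil => intro _; simp
  | cons i is ih =>
    intro hp
    rcases List.pairwise_cons.mp hp with ⟨hlt, hp'⟩
    simp only [List.flatMap_cons]
    apply List.pairwise_append.mpr
    refine ⟨?_, ih hp', ?_⟩
    · apply List.pairwise_replicate.mpr; simp
    · intro a ha b hb
      have ha' : a = i := List.eq_of_mem_replicate ha
      rcases List.mem_flatMap.mp hb with ⟨j, hj, hbj⟩
      have hb' : b = j := List.eq_of_mem_replicate hbj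
      subst ha'; subst hb'
      exact le_of_lt (hlt _ hj)

-- The unique ≤-sorted arrangement of a bounded multiset of ranks is the counting-sort output.
theorem pvSorted_eq_counting (rs ranks : List Int) (n : Nat)
    (hperm : rs.Perm ranks) (hsort : rs.Pairwise (· ≤ ·))
    (hmem : ∀ r ∈ ranks, 0 ≤ r ∧ r < (n : Int)) :
    rs = (PySem.List.pyRange 0 (n : Int) 1).flatMap
          (fun i => List.replicate (ranks.count i) i) := by
  have hnd := PySem.List.nodup_pyRange_one 0 (n : Int)
  apply List.Perm.eq_of_pairwise (le := (· ≤ ·)) (l₁ := rs)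
  · intro a b _ _ h1 h2; omega
  · exact hsort
  · exact pvPairwise_flatMap_replicate _ _ (PySem.List.pairwise_lt_pyRange_one 0 (n : Int))
  · apply List.perm_iff_count.mpr
    intro a
    rw [List.Perm.count_eq hperm]
    rw [pvCount_flatMap_replicate _ a _ hnd]
    by_cases hmemr : a ∈ PySem.List.pyRange 0 (n : Int) 1
    · simp [hmemr]
    · have : a ∉ ranks := by
        intro hin
        exact hmemr (PySem.List.mem_pyRange_one.mpr ⟨(hmem a hin).1, (hmem a hin).2⟩)
      simp [hmemr, List.count_eq_zero_of_not_mem this]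

-- ===== VERDICT (by name: the statement is the Claim_ definition above) =====
theorem recoverOrder_spec : Claim_equal_recoverOrder := by
  intro order friends _ hpre
  unfold Spec_recoverOrder recoverOrder recoverOrder_alt
  simp only []
  set hashmap := (PySem.List.enumerate order 0).foldl (fun d p => d.insert p.2 p.1)
      (PySem.Dict.empty : PySem.Dict Int Int) with hhm
  set h : Int → Int := fun f => ((hashmap.get? f).getD 0) with hh
  set g : Int → Int := fun r => PySem.List.pyGetD order r 0 with hgdef
  -- facts about h on friends
  have hspec : ∀ f ∈ friends, 0 ≤ h f ∧ h f < (order.length : Int) ∧ g (h f) = f := by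
    intro f hf
    rcases pvHashmap_spec order f (hpre f hf) with ⟨k, hk, hget, hidx⟩
    have hhf : h f = (k : Int) := hget
    refine ⟨by omega, by omega, ?_⟩
    rw [hhf]
    show PySem.List.pyGetD order ((k : Nat) : Int) 0 = f
    rw [PySem.List.pyGetD_eq_getElem order 0 (Int.natCast_nonneg k) (by exact_mod_cast hk)]
    simp only [Int.toNat_natCast]
    exact (List.getElem?_eq_some_iff.mp hidx).2
  -- A side
  rw [PySem.List.foldl_append_singleton_eq_map (fun f => (h f, f)) friends []]
  rw [List.nil_append]
  set freq : List (Int × Int) := friends.map (fun f => (h f, f)) with hfreq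
  have hgfreq : ∀ p ∈ freq, p.2 = g p.1 := by
    intro p hp
    rcases List.mem_map.mp hp with ⟨f, hf, rfl⟩
    exact ((hspec f hf).2.2).symm
  rw [pvSorted2_eq_sorted_fst freq g hgfreq]
  rw [PySem.List.foldl_append_singleton_eq_map (fun p : Int × Int => p.2) (PySem.List.sorted freq (fun p => p.1)) []]
  rw [List.nil_append]
  set srt := PySem.List.sorted freq (fun p => p.1) with hsrt
  have hmap2 : srt.map (fun p : Int × Int => p.2) = (srt.map (fun p : Int × Int => p.1)).map g := by
    rw [List.map_map]
    apply List.map_congr_left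
    intro p hp
    have hpin : p ∈ freq := (PySem.List.mem_sorted freq (fun p : Int × Int => p.1) false p).mp hp
    simpa using hgfreq p hpin
  rw [hmap2]
  set rs := srt.map (fun p : Int × Int => p.1) with hrs
  set ranks := friends.map h with hranks
  have hperm : rs.Perm ranks := by
    have := (PySem.List.sorted_perm freq (fun p : Int × Int => p.1) false).map (fun p : Int × Int => p.1)
    rw [hfreq, List.map_map] at this
    exact this
  have hsrtp : rs.Pairwise (· ≤ ·) := by
    have := PySem.List.sorted_pairwise freq (fun p : Int × Int => p.1)
    exact List.pairwise_map.mpr this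
  have hmem : ∀ r ∈ ranks, 0 ≤ r ∧ r < ((order.length : Nat) : Int) := by
    intro r hr
    rcases List.mem_map.mp hr with ⟨f, hf, rfl⟩
    exact ⟨(hspec f hf).1, (hspec f hf).2.1⟩
  rw [pvSorted_eq_counting rs ranks order.length hperm hsrtp hmem]
  -- B side
  rw [show (friends.foldl (fun d f => d.modify ((hashmap.get? f).getD 0) 0 (· + 1))
      (PySem.Dict.empty : PySem.Dict Int Int)) = PySem.Dict.counter ranks by
    rw [PySem.Dict.counter_eq_foldl, hranks, List.foldl_map]]
  rw [PySem.List.foldl_append_eq_flatMap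
    (fun rank => PySem.List.pyRepeat [PySem.List.pyGetD order rank 0] ((PySem.Dict.counter ranks).getD rank 0)) _ []]
  rw [List.nil_append]
  rw [List.map_flatMap]
  apply List.flatMap_congr
  intro i _
  rw [PySem.Dict.getD_counter, PySem.List.pyRepeat_singleton, Int.toNat_natCast, List.map_replicate]
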